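-- pv_equiv track=rewrite | github.com/sahilpingale07/Yoga-Pose-Detection-and-Feedback-System | feedback.py | feedback_ardhamatsyendrasana
-- ===== SOURCE A (Python) =====
-- def feedback_ardhamatsyendrasana(angles):
--     """
--     Feedback for Ardhamatsyendrasana (Half Lord of the Fishes Pose).
--     angles: Dictionary containing key angles.
--     Returns:
--         - feedback_messages: List of feedback instructions (max 3).
--         - highlighted_keypoints: Set of keypoints to highlight.
--     """
--     feedback_items = []
--
--     neck = angles.get('neck', 0)
--     left_hip = angles.get('left_hip', 0)
--     right_hip = angles.get('right_hip', 0)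
--     left_knee = angles.get('left_knee', 0)
--     right_knee = angles.get('right_knee', 0)
--     left_elbow = angles.get('left_elbow', 0)
--     right_elbow = angles.get('right_elbow', 0)
--     left_shoulder = angles.get('left_shoulder', 0)
--     right_shoulder = angles.get('right_shoulder', 0)
--
--     # 1. Hip rotation check
--     if not (70 <= left_hip <= 110):
--         deviation = abs(90 - left_hip)
--         message = "Rotate your hip slightly more to support the twist." if left_hip < 70 else "Relax the hip to avoid over-twisting."
--         feedback_items.append((message, 'left_hip', deviation))
--
--     if not (70 <= right_hip <= 110):
--         deviation = abs(90 - right_hip)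
--         message = "Rotate your hip slightly more to support the twist." if right_hip < 70 else "Relax the hip to avoid over-twisting."
--         feedback_items.append((message, 'right_hip', deviation))
--
--     # 2. Arm raised and placed on opposite knee (assume left hand over right knee)
--     if not (70 <= left_elbow <= 110):
--         deviation = abs(90 - left_elbow)
--         message = "Raise your left arm and press it against your right knee to deepen the twist."
--         feedback_items.append((message, 'left_elbow', deviation))
--
--     # 3. Bent knee check
--     if not (50 <= right_knee <= 90):
--         deviation = abs(70 - right_knee)
--         message = "Bend your right knee properly to ground the foot beside your thigh."
--         feedback_items.append((message, 'right_knee', deviation))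
--
--     # 4. Shoulder alignment (for spinal twist)
--     if not (30 <= left_shoulder <= 60):
--         deviation = abs(45 - left_shoulder)
--         message = "Twist your torso more from the waist to align your shoulders."
--         feedback_items.append((message, 'left_shoulder', deviation))
--
--     # 5. Neck rotation
--     if not (40 <= neck <= 60):
--         deviation = abs(50 - neck)
--         message = "Gently turn your head to follow the direction of the twist."
--         feedback_items.append((message, 'neck', deviation))
--
--     # Sort and select top 3 feedbacks based on deviation
--     feedback_items.sort(key=lambda x: x[2], reverse=True)
--     top_items = feedback_items[:1]
--
--     # Extract messages and keypoints
--     feedback_messages = [item[0] for item in top_items]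
--     highlighted_keypoints = set(item[1] for item in top_items)
--
--     return feedback_messages, highlighted_keypoints
-- ===== SOURCE B (Python) =====
-- def feedback_ardhamatsyendrasana(angles):
--     """Single pass over a check table keeping the running worst (max-deviation) item; no sort."""
--     checks = [
--         ('left_hip', 70, 110, 90, None),
--         ('right_hip', 70, 110, 90, None),
--         ('left_elbow', 70, 110, 90, "Raise your left arm and press it against your right knee to deepen the twist."),
--         ('right_knee', 50, 90, 70, "Bend your right knee properly to ground the foot beside your thigh."),
--         ('left_shoulder', 30, 60, 45, "Twist your torso more from the waist to align your shoulders."),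
--         ('neck', 40, 60, 50, "Gently turn your head to follow the direction of the twist."),
--     ]
--     best = None  # (message, keypoint, deviation)
--     for kp, lo, hi, center, msg in checks:
--         v = angles.get(kp, 0)
--         if lo <= v <= hi:
--             continue
--         if msg is None:  # hip checks: message depends on the direction
--             msg = ("Rotate your hip slightly more to support the twist." if v < lo
--                    else "Relax the hip to avoid over-twisting.")
--         dev = abs(center - v)
--         if best is None or dev > best[2]:
--             best = (msg, kp, dev)
--     if best is None:
--         return [], set()
--     return [best[0]], {best[1]}
-- ===== Notes on version B (the rewrite author's own statement) =====
-- stated objective: simpler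
-- what changed: Replaces the six inline if-blocks plus sort-and-slice with a data-driven check table scanned once while keeping the running maximum-deviation item (strict > preserves the first maximum, matching the stable reverse sort), so no candidate list, sort or slice is built.
import Mathlib
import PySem

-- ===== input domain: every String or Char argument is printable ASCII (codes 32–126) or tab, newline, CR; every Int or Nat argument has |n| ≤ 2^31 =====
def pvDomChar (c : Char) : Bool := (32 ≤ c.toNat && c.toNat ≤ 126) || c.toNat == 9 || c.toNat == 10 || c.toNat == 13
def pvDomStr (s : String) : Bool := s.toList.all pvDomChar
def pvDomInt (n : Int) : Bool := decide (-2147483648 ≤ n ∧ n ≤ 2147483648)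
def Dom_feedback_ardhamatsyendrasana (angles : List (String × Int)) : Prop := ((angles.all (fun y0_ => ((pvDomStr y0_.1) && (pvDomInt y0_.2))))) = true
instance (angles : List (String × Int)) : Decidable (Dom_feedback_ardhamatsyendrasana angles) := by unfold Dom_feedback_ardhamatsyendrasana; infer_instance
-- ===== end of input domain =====

-- B replaces A's six inline if-blocks + stable reverse sort + slice by a data-driven check
-- table scanned once keeping the running maximum-deviation item (objective: simpler).


-- ===== PORT A =====
def feedback_ardhamatsyendrasana (angles : List (String × Int)) : List String × List String :=
  let d := PySem.Dict.ofList angles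
  let neck := d.getD "neck" 0
  let left_hip := d.getD "left_hip" 0
  let right_hip := d.getD "right_hip" 0
  let _left_knee := d.getD "left_knee" 0
  let right_knee := d.getD "right_knee" 0
  let left_elbow := d.getD "left_elbow" 0
  let _right_elbow := d.getD "right_elbow" 0
  let left_shoulder := d.getD "left_shoulder" 0
  let _right_shoulder := d.getD "right_shoulder" 0
  let items : List (String × String × Int) := []
  let items := if ¬ (70 ≤ left_hip ∧ left_hip ≤ 110) then
      items ++ [((if left_hip < 70 then "Rotate your hip slightly more to support the twist."
                  else "Relax the hip to avoid over-twisting."), "left_hip", |90 - left_hip|)]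
    else items
  let items := if ¬ (70 ≤ right_hip ∧ right_hip ≤ 110) then
      items ++ [((if right_hip < 70 then "Rotate your hip slightly more to support the twist."
                  else "Relax the hip to avoid over-twisting."), "right_hip", |90 - right_hip|)]
    else items
  let items := if ¬ (70 ≤ left_elbow ∧ left_elbow ≤ 110) then
      items ++ [("Raise your left arm and press it against your right knee to deepen the twist.",
                 "left_elbow", |90 - left_elbow|)]
    else items
  let items := if ¬ (50 ≤ right_knee ∧ right_knee ≤ 90) then
      items ++ [("Bend your right knee properly to ground the foot beside your thigh.",
                 "right_knee", |70 - right_knee|)]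
    else items
  let items := if ¬ (30 ≤ left_shoulder ∧ left_shoulder ≤ 60) then
      items ++ [("Twist your torso more from the waist to align your shoulders.",
                 "left_shoulder", |45 - left_shoulder|)]
    else items
  let items := if ¬ (40 ≤ neck ∧ neck ≤ 60) then
      items ++ [("Gently turn your head to follow the direction of the twist.",
                 "neck", |50 - neck|)]
    else items
  let sortedItems := PySem.List.sorted items (fun x => x.2.2) true
  let top := sortedItems.take 1
  (top.map (fun it => it.1), PySem.Set.ofList (top.map (fun it => it.2.1)))

-- ===== PORT B =====
-- B-side helper: the check table (keypoint, low, high, center, fixed message or none for the hips)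
def pvChecks : List (String × Int × Int × Int × Option String) :=
  [("left_hip", 70, 110, 90, none),
   ("right_hip", 70, 110, 90, none),
   ("left_elbow", 70, 110, 90, some "Raise your left arm and press it against your right knee to deepen the twist."),
   ("right_knee", 50, 90, 70, some "Bend your right knee properly to ground the foot beside your thigh."),
   ("left_shoulder", 30, 60, 45, some "Twist your torso more from the waist to align your shoulders."),
   ("neck", 40, 60, 50, some "Gently turn your head to follow the direction of the twist.")]

def feedback_ardhamatsyendrasana_alt (angles : List (String × Int)) : List String × List String :=
  let d := PySem.Dict.ofList angles
  let best := pvChecks.foldl (fun best c =>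
      let v := d.getD c.1 0
      if c.2.1 ≤ v ∧ v ≤ c.2.2.1 then best
      else
        let msg := match c.2.2.2.2 with
          | none => if v < c.2.1 then "Rotate your hip slightly more to support the twist."
                    else "Relax the hip to avoid over-twisting."
          | some m => m
        let dev := |c.2.2.2.1 - v|
        match best with
        | none => some (msg, c.1, dev)
        | some b => if dev > b.2.2 then some (msg, c.1, dev) else best) none
  match best with
  | none => ([], [])
  | some b => ([b.1], [b.2.1])

-- ===== PRECONDITION & SPEC =====
def Spec_feedback_ardhamatsyendrasana (angles : List (String × Int)) (out : List String × List String) : Prop := out = feedback_ardhamatsyendrasana_alt angles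
instance (angles : List (String × Int)) (out : List String × List String) : Decidable (Spec_feedback_ardhamatsyendrasana angles out) := by unfold Spec_feedback_ardhamatsyendrasana; infer_instance

-- ===== CLAIM (what is proved, stated in full; the proofs are below) =====
def Claim_equal_feedback_ardhamatsyendrasana : Prop := ∀ (angles : List (String × Int)), Dom_feedback_ardhamatsyendrasana angles → Spec_feedback_ardhamatsyendrasana angles (feedback_ardhamatsyendrasana angles)

-- ===== LEMMAS AND PROOFS =====

-- the running-best selector B uses (strict >, so the FIRST maximal element wins)
def pvSel (b : Option (String × String × Int)) (x : String × String × Int) :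
    Option (String × String × Int) :=
  match b with
  | none => some x
  | some y => if x.2.2 > y.2.2 then some x else some y

-- the candidate item a fired check contributes
def pvCand (d : PySem.Dict String Int) (c : String × Int × Int × Int × Option String) :
    String × String × Int :=
  ((match c.2.2.2.2 with
    | none => if PySem.Dict.getD d c.1 0 < c.2.1 then "Rotate your hip slightly more to support the twist."
              else "Relax the hip to avoid over-twisting."
    | some m => m), c.1, |c.2.2.2.1 - PySem.Dict.getD d c.1 0|)

-- the candidate list a run over a check table produces
def pvItems (d : PySem.Dict String Int) : List (String × Int × Int × Int × Option String) → List (String × String × Int)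
  | [] => []
  | c :: cs =>
      (if c.2.1 ≤ PySem.Dict.getD d c.1 0 ∧ PySem.Dict.getD d c.1 0 ≤ c.2.2.1 then []
       else [pvCand d c]) ++ pvItems d cs

lemma head?_insertBy {α : Type} (before : α → α → Bool) (x : α) (acc : List α) :
    (PySem.List.insertBy before x acc).head? =
      match acc with
      | [] => some x
      | y :: _ => if before x y then some x else some y := by
  cases acc with
  | nil => rfl
  | cons y ys => simp [PySem.List.insertBy]; split <;> simp

lemma head?_foldl_insertBy {α : Type} (before : α → α → Bool) :
    ∀ (l acc : List α),
      (l.foldl (fun a x => PySem.List.insertBy before x a) acc).head? =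
        l.foldl (fun b x =>
          match b with
          | none => some x
          | some y => if before x y then some x else some y) acc.head? := by
  intro l
  induction l with
  | nil => intro acc; rfl
  | cons x xs ih =>
    intro acc
    simp only [List.foldl]
    rw [ih, head?_insertBy]
    cases acc <;> rfl

-- head of the stable reverse sort by deviation = running best under strict >
lemma top1_eq (l : List (String × String × Int)) :
    ((((PySem.List.sorted l (fun x => x.2.2) true).take 1).map (fun it => it.1)),
      PySem.Set.ofList (((PySem.List.sorted l (fun x => x.2.2) true).take 1).map (fun it => it.2.1)))
    = match l.foldl pvSel none with
      | none => ([], [])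
      | some b => ([b.1], [b.2.1]) := by
  have hfold : (PySem.List.sorted l (fun x => x.2.2) true).head? = l.foldl pvSel none := by
    rw [PySem.List.sorted_rev_eq_foldl_insertBy,
        head?_foldl_insertBy (fun a b => decide (b.2.2 < a.2.2)) l []]
    apply PySem.List.foldl_congr_mem
    intro b x _
    cases b with
    | none => rfl
    | some y =>
      simp only [pvSel]
      by_cases h : y.2.2 < x.2.2 <;> simp [h, gt_iff_lt]
  cases hs : PySem.List.sorted l (fun x => x.2.2) true with
  | nil => rw [hs] at hfold; simp at hfold; rw [← hfold]; rfl
  | cons m t =>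
    rw [hs] at hfold; simp at hfold; rw [← hfold]
    simp [PySem.Set.ofList, PySem.Set.add, PySem.Set.empty]

-- B's single pass over a check table = running-best selection over the candidate list
lemma foldB (d : PySem.Dict String Int) :
    ∀ (cs : List (String × Int × Int × Int × Option String)) (acc : Option (String × String × Int)),
      cs.foldl (fun best c =>
        let v := PySem.Dict.getD d c.1 0
        if c.2.1 ≤ v ∧ v ≤ c.2.2.1 then best
        else
          let msg := match c.2.2.2.2 with
            | none => if v < c.2.1 then "Rotate your hip slightly more to support the twist."
                      else "Relax the hip to avoid over-twisting."
            | some m => m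
          let dev := |c.2.2.2.1 - v|
          match best with
          | none => some (msg, c.1, dev)
          | some b => if dev > b.2.2 then some (msg, c.1, dev) else best) acc
      = (pvItems d cs).foldl pvSel acc := by
  intro cs
  induction cs with
  | nil => intro acc; rfl
  | cons c cs ih =>
    intro acc
    simp only [List.foldl, pvItems, List.foldl_append]
    rw [ih]
    by_cases hg : c.2.1 ≤ PySem.Dict.getD d c.1 0 ∧ PySem.Dict.getD d c.1 0 ≤ c.2.2.1
    · simp [hg]
    · simp only [hg, if_false]
      cases acc <;> rfl

-- ===== VERDICT (by name: the statement is the Claim_ definition above) =====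
set_option maxHeartbeats 2000000 in
theorem feedback_ardhamatsyendrasana_spec : Claim_equal_feedback_ardhamatsyendrasana := by
  intro angles _
  show feedback_ardhamatsyendrasana angles = feedback_ardhamatsyendrasana_alt angles
  simp only [feedback_ardhamatsyendrasana, feedback_ardhamatsyendrasana_alt]
  generalize PySem.Dict.ofList angles = d
  rw [foldB, top1_eq]
  simp only [pvItems, pvChecks, pvCand]
  split_ifs <;>
    simp only [List.append_nil, List.nil_append, List.cons_append]
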